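-- pv_equiv track=rewrite | github.com/bbl-tech1020/worklist_generate_system | dashboard/views_TecanIngest.py | _linear_fill_vertical_from_A1
-- ===== SOURCE A (Python) =====
-- _PLATE_ROWS = list("ABCDEFGH")  # 8
--
-- _PLATE_COLS = list(range(1, 13))  # 1..12
--
-- def _linear_fill_vertical_from_A1(n: int) -> list[tuple[str, int]]:
--     """
--     纵向：A1->B1->...->H1->A2->...->H2->... 生成前 n 个坐标
--     """
--     coords = []
--     col_idx = 0
--     row_idx = 0
--     for _ in range(n):
--         coords.append((_PLATE_ROWS[row_idx], _PLATE_COLS[col_idx]))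
--         row_idx += 1
--         if row_idx >= len(_PLATE_ROWS):
--             row_idx = 0
--             col_idx += 1
--             if col_idx >= len(_PLATE_COLS):
--                 break
--     return coords
-- ===== SOURCE B (Python) =====
-- _PLATE_ROWS = list("ABCDEFGH")  # 8
--
-- _PLATE_COLS = list(range(1, 13))  # 1..12
--
-- # Full plate enumerated column-major, built once at import time.
-- _ALL_CELLS = [(r, c) for c in _PLATE_COLS for r in _PLATE_ROWS]
--
--
-- def _linear_fill_vertical_from_A1(n: int) -> list[tuple[str, int]]:
--     """Answer by slicing the precomputed column-major table of all 96 cells."""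
--     return _ALL_CELLS[:max(n, 0)]
-- ===== Notes on version B (the rewrite author's own statement) =====
-- stated objective: simpler
-- what changed: Replaces the stateful per-call loop with rollover counters and a nested break by a full-plate column-major table built once by a nested comprehension, which each call merely slices to the first max(n,0) cells.
import Mathlib
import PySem

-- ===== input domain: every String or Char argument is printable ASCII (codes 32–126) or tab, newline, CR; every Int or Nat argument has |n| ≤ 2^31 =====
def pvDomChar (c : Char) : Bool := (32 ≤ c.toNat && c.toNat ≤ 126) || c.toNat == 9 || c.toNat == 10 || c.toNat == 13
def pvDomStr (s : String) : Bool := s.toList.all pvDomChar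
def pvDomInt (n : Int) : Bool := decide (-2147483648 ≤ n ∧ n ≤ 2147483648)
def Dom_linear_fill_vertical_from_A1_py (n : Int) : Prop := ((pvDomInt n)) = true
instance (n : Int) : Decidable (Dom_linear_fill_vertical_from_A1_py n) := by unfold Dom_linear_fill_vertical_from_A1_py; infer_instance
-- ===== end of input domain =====

-- B precomputes the full column-major plate table once (nested comprehension) and
-- answers each call by slicing it to the first max(n,0) cells; objective: simpler.

-- ===== PORT A =====
def pvPlateRows : List String := ["A", "B", "C", "D", "E", "F", "G", "H"]

def pvPlateCols : List Int := [1, 2, 3, 4, 5, 6, 7, 8, 9, 10, 11, 12]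

-- A's for-loop over range(n) with a break, as fuel recursion on the remaining iterations;
-- the indices are always in range, so pyGetD's default is never used.
def pvALoop : Nat → Int → Int → List (String × Int)
  | 0, _, _ => []
  | f + 1, colIdx, rowIdx =>
    let elem := (PySem.List.pyGetD pvPlateRows rowIdx "", PySem.List.pyGetD pvPlateCols colIdx 0)
    let rowIdx' := rowIdx + 1
    if rowIdx' ≥ 8 then
      let colIdx' := colIdx + 1
      if colIdx' ≥ 12 then [elem]  -- break: stop with what was collected
      else elem :: pvALoop f colIdx' 0
    else elem :: pvALoop f colIdx rowIdx'

def linear_fill_vertical_from_A1_py (n : Int) : List (String × Int) :=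
  pvALoop n.toNat 0 0

-- ===== PORT B =====
-- _ALL_CELLS = [(r, c) for c in _PLATE_COLS for r in _PLATE_ROWS]
def pvAllCells : List (String × Int) :=
  pvPlateCols.flatMap (fun c => pvPlateRows.map (fun r => (r, c)))

-- _ALL_CELLS[:max(n, 0)]
def linear_fill_vertical_from_A1_py_alt (n : Int) : List (String × Int) :=
  PySem.List.slice pvAllCells none (some (max n 0))

-- ===== PRECONDITION & SPEC =====
def Spec_linear_fill_vertical_from_A1_py (n : Int) (out : List (String × Int)) : Prop := out = linear_fill_vertical_from_A1_py_alt n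
instance (n : Int) (out : List (String × Int)) : Decidable (Spec_linear_fill_vertical_from_A1_py n out) := by unfold Spec_linear_fill_vertical_from_A1_py; infer_instance

-- ===== CLAIM (what is proved, stated in full; the proofs are below) =====
def Claim_equal_linear_fill_vertical_from_A1_py : Prop := ∀ (n : Int), Dom_linear_fill_vertical_from_A1_py n → Spec_linear_fill_vertical_from_A1_py n (linear_fill_vertical_from_A1_py n)

-- ===== LEMMAS AND PROOFS =====

/-- The cell A's loop emits at linear index i, characterised arithmetically. -/
def pvElt (i : Int) : String × Int :=
  (PySem.List.pyGetD pvPlateRows (i % 8) "", PySem.List.pyGetD pvPlateCols (i / 8) 0)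

lemma pvElt_eq (colIdx rowIdx : Int) (hr0 : 0 ≤ rowIdx) (hr : rowIdx < 8) :
    pvElt (colIdx * 8 + rowIdx)
      = (PySem.List.pyGetD pvPlateRows rowIdx "", PySem.List.pyGetD pvPlateCols colIdx 0) := by
  unfold pvElt
  have h1 : (colIdx * 8 + rowIdx) % 8 = rowIdx := by omega
  have h2 : (colIdx * 8 + rowIdx) / 8 = colIdx := by omega
  rw [h1, h2]

/-- Loop invariant: from state (colIdx, rowIdx) with fuel f, A's loop produces the cells at
    consecutive linear indices starting at colIdx*8+rowIdx, capped by the remaining capacity. -/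
lemma pvALoop_eq (f : Nat) : ∀ (colIdx rowIdx : Int), 0 ≤ rowIdx → rowIdx < 8 →
    0 ≤ colIdx → colIdx < 12 →
    pvALoop f colIdx rowIdx
      = (List.range (min f ((12 - colIdx) * 8 - rowIdx).toNat)).map
          (fun (j : Nat) => pvElt (colIdx * 8 + rowIdx + (j : Int))) := by
  induction f with
  | zero => intro c r _ _ _ _; simp [pvALoop]
  | succ f ih =>
    intro c r hr0 hr hc0 hc
    rw [pvALoop]
    by_cases h1 : r + 1 ≥ 8
    · have hr7 : r = 7 := by omega
      subst hr7
      by_cases h2 : c + 1 ≥ 12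
      · have hc11 : c = 11 := by omega
        subst hc11
        simp only [h1, h2, if_pos]
        have hmin : min (f + 1) ((12 - (11:Int)) * 8 - 7).toNat = 1 := by omega
        rw [hmin]
        decide
      · simp only [ge_iff_le, h1, if_true, h2, if_false]
        have hmin : min (f + 1) ((12 - c) * 8 - 7).toNat
            = min f ((12 - (c + 1)) * 8 - 0).toNat + 1 := by omega
        rw [hmin, List.range_succ_eq_map, List.map_cons,
            ih (c + 1) 0 (by omega) (by omega) (by omega) (by omega), List.map_map]
        congr 1
        · rw [show ((0:Nat):Int) = 0 from rfl, add_zero, pvElt_eq c 7 (by omega) (by omega)]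
        · apply List.map_congr_left
          intro j _
          simp only [Function.comp]
          congr 1
          push_cast
          ring
    · simp only [ge_iff_le, h1, if_false]
      have hmin : min (f + 1) ((12 - c) * 8 - r).toNat
          = min f ((12 - c) * 8 - (r + 1)).toNat + 1 := by omega
      rw [hmin, List.range_succ_eq_map, List.map_cons,
          ih c (r + 1) (by omega) (by omega) hc0 hc, List.map_map]
      congr 1
      · rw [show ((0:Nat):Int) = 0 from rfl, add_zero, pvElt_eq c r hr0 hr]
      · apply List.map_congr_left
        intro j _
        simp only [Function.comp]
        congr 1
        push_cast
        ring

/-- The precomputed table is exactly the 96 cells in linear-index order. -/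
lemma pvAllCells_eq : pvAllCells = (List.range 96).map (fun (j : Nat) => pvElt (j : Int)) := by
  decide

-- ===== VERDICT (by name: the statement is the Claim_ definition above) =====
theorem linear_fill_vertical_from_A1_py_spec : Claim_equal_linear_fill_vertical_from_A1_py := by
  intro n _
  unfold Spec_linear_fill_vertical_from_A1_py linear_fill_vertical_from_A1_py
    linear_fill_vertical_from_A1_py_alt
  rw [pvALoop_eq n.toNat 0 0 (by omega) (by omega) (by omega) (by omega)]
  have hmax : max n 0 = ((n.toNat : Nat) : Int) := by omega
  rw [hmax, PySem.List.slice_to_natCast, pvAllCells_eq, ← List.map_take, List.take_range]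
  apply List.map_congr_left
  intro j _
  simp only [pvElt, zero_mul, zero_add]
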